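-- pv_equiv track=rewrite | github.com/Trish-K/PythonProblems | labs109.py | knight_jump
-- ===== SOURCE A (Python) =====
-- def knight_jump(knight, start, end):
--     zip_obj = zip(start,end)
--     diff = []
--     for i,j in zip_obj:
--         diff.append(abs(i-j))
--     for i in knight:
--         if i in diff:
--             diff.remove(i)
--         else:
--             return False
--     return True
-- ===== SOURCE B (Python) =====
-- from collections import Counter
--
-- def knight_jump(knight, start, end):
--     need = Counter(knight)
--     have = Counter(abs(i - j) for i, j in zip(start, end))
--     return not (need - have)
-- ===== Notes on version B (the rewrite author's own statement) =====
-- stated objective: simpler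
-- what changed: Replaced the membership-test-and-remove loop over a mutating list with two Counter builds and a multiset subtraction (sub-multiset containment check).
import Mathlib
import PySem

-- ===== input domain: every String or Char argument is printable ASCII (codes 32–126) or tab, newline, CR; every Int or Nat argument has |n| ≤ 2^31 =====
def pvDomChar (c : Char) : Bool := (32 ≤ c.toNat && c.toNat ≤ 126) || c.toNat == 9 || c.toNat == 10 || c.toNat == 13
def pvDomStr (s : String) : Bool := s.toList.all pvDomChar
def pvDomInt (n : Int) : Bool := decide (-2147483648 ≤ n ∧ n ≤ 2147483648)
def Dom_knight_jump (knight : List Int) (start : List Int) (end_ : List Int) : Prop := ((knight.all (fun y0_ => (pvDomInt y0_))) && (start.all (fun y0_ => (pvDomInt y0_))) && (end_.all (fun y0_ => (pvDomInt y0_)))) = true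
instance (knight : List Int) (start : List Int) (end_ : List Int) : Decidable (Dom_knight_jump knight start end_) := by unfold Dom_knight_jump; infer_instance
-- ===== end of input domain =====

-- B replaces A's membership-test-and-remove loop by two Counter builds and a
-- multiset-containment check (simpler, one pass per list).

-- ===== PORT A =====
-- the 'for i in knight' loop: membership test, then diff.remove(i) = erase the
-- first occurrence (exact: Python list.remove removes the first equal element,
-- and the membership guard makes it total)
def knightLoopA : List Int → List Int → Bool
  | [], _ => true
  | i :: rest, diff => if i ∈ diff then knightLoopA rest (diff.erase i) else false

def knight_jump (knight : List Int) (start : List Int) (end_ : List Int) : Bool :=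
  let diff := (start.zip end_).foldl (fun acc p => acc ++ [|p.1 - p.2|]) []
  knightLoopA knight diff

-- ===== PORT B =====
def knight_jump_alt (knight : List Int) (start : List Int) (end_ : List Int) : Bool :=
  let need := PySem.Dict.counter knight
  let hav := PySem.Dict.counter ((start.zip end_).map (fun p => |p.1 - p.2|))
  -- 'not (need - hav)': Counter subtraction keeps positive counts only, so the
  -- result is falsy iff every count in need is covered by hav
  need.items.all (fun p => decide (p.2 ≤ hav.getD p.1 0))

-- ===== PRECONDITION & SPEC =====
def Spec_knight_jump (knight : List Int) (start : List Int) (end_ : List Int) (out : Bool) : Prop := out = knight_jump_alt knight start end_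
instance (knight : List Int) (start : List Int) (end_ : List Int) (out : Bool) : Decidable (Spec_knight_jump knight start end_ out) := by unfold Spec_knight_jump; infer_instance

-- ===== CLAIM (what is proved, stated in full; the proofs are below) =====
def Claim_equal_knight_jump : Prop := ∀ (knight : List Int) (start : List Int) (end_ : List Int), Dom_knight_jump knight start end_ → Spec_knight_jump knight start end_ (knight_jump knight start end_)

-- ===== LEMMAS AND PROOFS =====

-- A's loop succeeds iff knight is a sub-multiset of diff (counted)
theorem knightLoopA_iff (ks : List Int) : ∀ (diff : List Int),
    knightLoopA ks diff = true ↔ ∀ k, ks.count k ≤ diff.count k := by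
  induction ks with
  | nil => intro diff; simp [knightLoopA]
  | cons i rest ih =>
    intro diff
    by_cases hmem : i ∈ diff
    · rw [knightLoopA, if_pos hmem, ih]
      have hd : 1 ≤ diff.count i := List.one_le_count_iff.mpr hmem
      have key : ∀ k, ((i :: rest).count k = rest.count k + (if i = k then 1 else 0))
          ∧ ((diff.erase i).count k = diff.count k - (if i = k then 1 else 0)) := by
        intro k
        constructor
        · rw [List.count_cons]; by_cases hik : i = k <;> simp [hik]
        · rw [List.count_erase]; by_cases hik : i = k <;> simp [hik]
      constructor
      · intro h k
        have hk := h k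
        obtain ⟨hc, he⟩ := key k
        by_cases hik : i = k
        · rw [if_pos hik] at hc he; subst hik; omega
        · rw [if_neg hik] at hc he; omega
      · intro h k
        have hk := h k
        obtain ⟨hc, he⟩ := key k
        by_cases hik : i = k
        · rw [if_pos hik] at hc he; subst hik; omega
        · rw [if_neg hik] at hc he; omega
    · rw [knightLoopA, if_neg hmem]
      constructor
      · intro h; exact absurd h (by simp)
      · intro h
        exfalso
        have hk := h i
        have h0 : diff.count i = 0 := List.count_eq_zero.mpr hmem
        have h1 : (i :: rest).count i = rest.count i + 1 := List.count_cons_self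
        omega

-- B returns true iff the same sub-multiset condition holds
theorem alt_iff (knight : List Int) (diff : List Int) :
    ((PySem.Dict.counter knight).items.all
      (fun p => decide (p.2 ≤ (PySem.Dict.counter diff).getD p.1 0))) = true ↔
    ∀ k, knight.count k ≤ diff.count k := by
  rw [PySem.Dict.items_counter]
  simp only [List.all_map, List.all_eq_true, Function.comp]
  constructor
  · intro h k
    by_cases hk : k ∈ knight
    · have := h k (by simpa [PySem.Set.mem_ofList] using hk)
      simpa [PySem.Dict.getD_counter] using this
    · simp [List.count_eq_zero.mpr hk]
  · intro h k _
    simpa [PySem.Dict.getD_counter] using h k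

theorem diff_build (start end_ : List Int) :
    (start.zip end_).foldl (fun acc p => acc ++ [|p.1 - p.2|]) []
      = (start.zip end_).map (fun p => |p.1 - p.2|) := by
  have : ∀ (l : List (Int × Int)) (acc : List Int),
      l.foldl (fun acc p => acc ++ [|p.1 - p.2|]) acc = acc ++ l.map (fun p => |p.1 - p.2|) := by
    intro l
    induction l with
    | nil => simp
    | cons x xs ih => intro acc; simp [List.foldl_cons, ih]
  simpa using this (start.zip end_) []

-- ===== VERDICT (by name: the statement is the Claim_ definition above) =====
theorem knight_jump_spec : Claim_equal_knight_jump := by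
  intro knight start end_ _
  unfold Spec_knight_jump knight_jump knight_jump_alt
  rw [Bool.eq_iff_iff, diff_build, knightLoopA_iff, alt_iff]
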